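-- pv_equiv track=rewrite | github.com/yandex-research/sparqling-queries | text2qdmr/datasets/utils/extract_values.py | parse_const_tree
-- ===== SOURCE A (Python) =====
-- def parse_const_tree(tree_str, level=None):
--     # split str
--     tree_str = tree_str.replace('\n', '').replace('(', '( ').replace(')', ' )')
--     tree = tree_str.split(' ')
--
--     stack = []
--     substrings = []
--     for el in tree:
--         if el != ')':
--             stack.append(el)
--         else:
--             last = stack.pop()
--             phrase = []
--             while last != '(':
--                 phrase.append(last)
--                 last = stack.pop()
--             phrase = phrase[:-1] # get rid of tag
--             phrase_str = ' '.join(i for i in phrase[::-1]) # convert to str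
--             if not level or len(phrase) - 1 <= level:
--                 substrings.append(phrase_str)
--                 #substrings.append(phrase_str.translate(translate_table))  # without punctuation
--             stack.append(phrase_str)
--     return list(dict.fromkeys(substrings))
-- ===== SOURCE B (Python) =====
-- def parse_const_tree(tree_str, level=None):
--     tokens = tree_str.replace('\n', '').replace('(', '( ').replace(')', ' )').split(' ')
--     frames = [[]]          # frames[-1] is the currently open node's child list; frames[0] collects stray top-level tokens
--     substrings = []
--     for tok in tokens:
--         if tok == '(':
--             frames.append([])
--         elif tok == ')':
--             elements = frames.pop()
--             phrase = elements[1:]          # drop the tag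
--             phrase_str = ' '.join(phrase)
--             if not level or len(phrase) - 1 <= level:
--                 substrings.append(phrase_str)
--             frames[-1].append(phrase_str)
--         else:
--             frames[-1].append(tok)
--     return list(dict.fromkeys(substrings))
-- ===== Notes on version B (the rewrite author's own statement) =====
-- stated objective: simpler
-- what changed: Replaces A's single flat token stack with '(' sentinels -- which at every ')' pops element-by-element back to the sentinel, drops the last popped element and reverses -- by a stack of per-node child-list frames updated in O(1) decisions per token: open pushes an empty frame, a token appends to the top frame, close pops the finished frame and joins it, with no inner backward scan, no reversal and no dropLast.
import Mathlib
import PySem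

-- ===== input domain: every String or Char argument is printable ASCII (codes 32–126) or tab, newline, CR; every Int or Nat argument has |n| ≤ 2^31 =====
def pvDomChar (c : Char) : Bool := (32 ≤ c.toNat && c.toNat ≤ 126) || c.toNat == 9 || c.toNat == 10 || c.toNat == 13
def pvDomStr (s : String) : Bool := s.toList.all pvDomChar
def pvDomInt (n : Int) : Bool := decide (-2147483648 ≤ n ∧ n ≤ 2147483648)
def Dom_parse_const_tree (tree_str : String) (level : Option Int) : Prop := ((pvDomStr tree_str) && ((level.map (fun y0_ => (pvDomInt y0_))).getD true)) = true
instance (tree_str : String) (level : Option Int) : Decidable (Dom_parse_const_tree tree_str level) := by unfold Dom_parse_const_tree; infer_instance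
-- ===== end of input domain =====

-- ===== PORT A =====
-- B replaces A's flat token stack with '(' sentinels (inner pop-until-sentinel scan, reverse,
-- dropLast at every ')') by a stack of per-node child-list frames updated in O(1) per token: simpler, no inner scan.

-- shared tokenization (identical in A and B):
-- tree_str.replace('\n','').replace('(','( ').replace(')',' )').split(' ')
def pvTokenize (s : String) : List String :=
  (PySem.Str.split? (PySem.Str.replace (PySem.Str.replace (PySem.Str.replace s "\n" "") "(" "( ") ")" " )") " ").getD []

-- shared level filter: Python's `not level or len(phrase) - 1 <= level` (n = len(phrase))
def pvKeep (level : Option Int) (n : Nat) : Bool :=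
  match level with
  | none => true
  | some l => decide (l = 0) || decide ((n : Int) - 1 ≤ l)

-- A's inner `while last != '(':` pop loop: returns (popped elements top-first, remaining stack)
def popPhrase (stack : List String) : List String × List String :=
  match stack with
  | [] => ([], [])   -- Python raises IndexError here (excluded by Pre_)
  | x :: rest =>
    if x = "(" then ([], rest)
    else
      let pr := popPhrase rest
      (x :: pr.1, pr.2)

-- one iteration of A's `for el in tree:` loop; state = (stack top-first, substrings)
def stepA (level : Option Int) (st : List String × List String) (el : String) : List String × List String :=
  if el ≠ ")" then (el :: st.1, st.2)
  else
    let pr := popPhrase st.1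
    let phrase := pr.1.dropLast                         -- phrase = phrase[:-1]
    let phrase_str := PySem.Str.join " " phrase.reverse -- ' '.join(phrase[::-1])
    let subs' := if pvKeep level phrase.length then st.2 ++ [phrase_str] else st.2
    (phrase_str :: pr.2, subs')

def parse_const_tree (tree_str : String) (level : Option Int) : List String :=
  PySem.List.dedup ((pvTokenize tree_str).foldl (stepA level) ([], [])).2

-- ===== PORT B =====
-- one iteration of B's loop; state = (frames, substrings); frames head = Python frames[-1]
def stepB (level : Option Int) (st : List (List String) × List String) (tok : String) : List (List String) × List String :=
  if tok = "(" then ([] :: st.1, st.2)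
  else if tok = ")" then
    match st.1 with
    | [] => ([], st.2)                                  -- unreachable: frames starts non-empty
    | elements :: rest =>
      let phrase := elements.drop 1                     -- elements[1:]
      let phrase_str := PySem.Str.join " " phrase
      let subs' := if pvKeep level phrase.length then st.2 ++ [phrase_str] else st.2
      match rest with
      | [] => ([], subs')                               -- Python raises IndexError here (excluded by Pre_)
      | g :: gs => ((g ++ [phrase_str]) :: gs, subs')
  else
    match st.1 with
    | [] => ([], st.2)                                  -- unreachable: frames starts non-empty
    | g :: gs => ((g ++ [tok]) :: gs, st.2)

def parse_const_tree_alt (tree_str : String) (level : Option Int) : List String :=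
  PySem.List.dedup ((pvTokenize tree_str).foldl (stepB level) ([[]], [])).2

-- ===== PRECONDITION & SPEC =====
-- Pre_ excludes exactly the unbalanced inputs (some prefix of the token list with more ')' tokens
-- than '(' tokens), on which the Python A raises IndexError (pop from an exhausted stack).
def Pre_parse_const_tree (tree_str : String) (level : Option Int) : Prop :=
  ∀ n ≤ (pvTokenize tree_str).length,
    ((((pvTokenize tree_str).take n).count ")" : Int) - (((pvTokenize tree_str).take n).count "(" : Int)) ≤ 0

instance (tree_str : String) (level : Option Int) : Decidable (Pre_parse_const_tree tree_str level) := by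
  unfold Pre_parse_const_tree; infer_instance

def pvWitness_parse_const_tree : String × Option Int := ("(NP (DT the) (NN cat))", none)

def Spec_parse_const_tree (tree_str : String) (level : Option Int) (out : List String) : Prop := out = parse_const_tree_alt tree_str level
instance (tree_str : String) (level : Option Int) (out : List String) : Decidable (Spec_parse_const_tree tree_str level out) := by unfold Spec_parse_const_tree; infer_instance

-- ===== CLAIM (what is proved, stated in full; the proofs are below) =====
def Claim_equal_parse_const_tree : Prop := ∀ (tree_str : String) (level : Option Int), Dom_parse_const_tree tree_str level → Pre_parse_const_tree tree_str level → Spec_parse_const_tree tree_str level (parse_const_tree tree_str level)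

-- ===== LEMMAS AND PROOFS =====

-- balance invariant: every prefix closes at most (opens so far + k) nodes
def pvBal (toks : List String) (k : Nat) : Prop :=
  ∀ n, (toks.take n).count ")" ≤ (toks.take n).count "(" + k

-- no element stored inside a frame is the sentinel "("
def pvFramesOK (frames : List (List String)) : Prop :=
  ∀ f ∈ frames, ∀ x ∈ f, x ≠ "("

-- A's flat stack encoding of B's frame stack (f0 = stray top-level tokens)
def pvStackRep : List (List String) → List String → List String
  | [], f0 => f0.reverse
  | f :: fs, f0 => f.reverse ++ "(" :: pvStackRep fs f0

theorem pvBal_paren {rest : List String} {k : Nat} (h : pvBal ("(" :: rest) k) :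
    pvBal rest (k + 1) := by
  intro n
  have := h (n + 1)
  simp at this
  omega

theorem pvBal_close {rest : List String} {k : Nat} (h : pvBal (")" :: rest) k) :
    1 ≤ k ∧ pvBal rest (k - 1) := by
  constructor
  · have := h 1
    simp at this
    omega
  · intro n
    have h1 := h 1
    have := h (n + 1)
    simp at this h1
    omega

theorem pvBal_other {t : String} {rest : List String} {k : Nat}
    (h1 : t ≠ "(") (h2 : t ≠ ")") (h : pvBal (t :: rest) k) : pvBal rest k := by
  intro n
  have := h (n + 1)
  simp [h1, h2] at this
  omega

theorem popPhrase_append (l R : List String) (hl : ∀ x ∈ l, x ≠ "(") :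
    popPhrase (l ++ "(" :: R) = (l, R) := by
  induction l with
  | nil => simp [popPhrase]
  | cons a t ih =>
    have ha : a ≠ "(" := hl a (by simp)
    simp [popPhrase, ha, ih fun x hx => hl x (by simp [hx])]

theorem pvJoin_ne_paren (l : List String) (hl : ∀ x ∈ l, x ≠ "(") :
    PySem.Str.join " " l ≠ "(" := by
  intro h
  have h' : (PySem.Str.join " " l).toList = ['('] := by rw [h]; rfl
  rw [PySem.Str.toList_join] at h'
  match l, hl with
  | [], _ => simp [PySem.Chars.join_nil] at h'
  | [x], hl =>
    rw [List.map_cons, List.map_nil, PySem.Chars.join_singleton] at h'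
    exact hl x (by simp) (by apply String.toList_injective; rw [h']; rfl)
  | x :: y :: rest, hl =>
    rw [List.map_cons, List.map_cons, PySem.Chars.join_cons_cons] at h'
    have hmem : ' ' ∈ (['('] : List Char) := by
      rw [← h']
      simp [show (" " : String).toList = [' '] from rfl]
    simp at hmem

theorem pvMain (level : Option Int) :
    ∀ (toks : List String) (frames : List (List String)) (f0 subs : List String),
      pvBal toks frames.length → pvFramesOK frames →
      (toks.foldl (stepA level) (pvStackRep frames f0, subs)).2
        = (toks.foldl (stepB level) (frames ++ [f0], subs)).2 := by
  intro toks
  induction toks with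
  | nil => intro frames f0 subs _ _; simp
  | cons t rest ih =>
    intro frames f0 subs hbal hok
    rw [List.foldl_cons, List.foldl_cons]
    by_cases hp : t = "("
    · subst hp
      have hA : stepA level (pvStackRep frames f0, subs) "(" = (pvStackRep ([] :: frames) f0, subs) := by
        simp [stepA, pvStackRep]
      have hB : stepB level (frames ++ [f0], subs) "(" = (([] :: frames) ++ [f0], subs) := by
        simp [stepB]
      rw [hA, hB]
      refine ih ([] :: frames) f0 subs (by simpa using pvBal_paren hbal) ?_
      intro f hf x hx
      rcases List.mem_cons.1 hf with h | h
      · subst h; simp at hx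
      · exact hok f h x hx
    · by_cases hc : t = ")"
      · subst hc
        obtain ⟨hk, hbal'⟩ := pvBal_close hbal
        cases frames with
        | nil => simp at hk
        | cons f1 fs =>
          have hf1 : ∀ x ∈ f1.reverse, x ≠ "(" := by
            intro x hx
            exact hok f1 (List.mem_cons_self) x (List.mem_reverse.1 hx)
          have hps : PySem.Str.join " " f1.tail ≠ "(" := by
            refine pvJoin_ne_paren _ ?_
            intro x hx
            exact hok f1 (List.mem_cons_self) x (List.mem_of_mem_tail hx)
          have hA : stepA level (pvStackRep (f1 :: fs) f0, subs) ")"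
              = (PySem.Str.join " " f1.tail :: pvStackRep fs f0,
                 if pvKeep level f1.tail.length then subs ++ [PySem.Str.join " " f1.tail] else subs) := by
            show stepA level (f1.reverse ++ "(" :: pvStackRep fs f0, subs) ")" = _
            rw [stepA]
            simp only [ne_eq, ite_not, popPhrase_append _ _ hf1,
              List.dropLast_reverse, List.reverse_reverse, List.length_reverse]
            simp
          have hB : stepB level ((f1 :: fs) ++ [f0], subs) ")"
              = ((match fs ++ [f0] with
                  | [] => [] | g :: gs => (g ++ [PySem.Str.join " " f1.tail]) :: gs),
                 if pvKeep level f1.tail.length then subs ++ [PySem.Str.join " " f1.tail] else subs) := by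
            rw [stepB]
            simp only [List.cons_append]
            simp [List.drop_one]
            cases fs <;> simp
          rw [hA, hB]
          cases fs with
          | nil =>
            simp only [List.nil_append]
            have hst : PySem.Str.join " " f1.tail :: pvStackRep [] f0
                = pvStackRep [] (f0 ++ [PySem.Str.join " " f1.tail]) := by
              simp [pvStackRep]
            rw [hst]
            exact ih [] _ _ (by simpa using hbal') (by intro f hf; simp at hf)
          | cons g gs =>
            simp only [List.cons_append]
            have hst : PySem.Str.join " " f1.tail :: pvStackRep (g :: gs) f0
                = pvStackRep ((g ++ [PySem.Str.join " " f1.tail]) :: gs) f0 := by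
              simp [pvStackRep]
            rw [hst]
            refine ih ((g ++ [PySem.Str.join " " f1.tail]) :: gs) f0 _ (by simpa using hbal') ?_
            intro f hf x hx
            rcases List.mem_cons.1 hf with h | h
            · subst h
              rcases List.mem_append.1 hx with h' | h'
              · exact hok g (by simp) x h'
              · simp at h'; subst h'; exact hps
            · exact hok f (by simp [h]) x hx
      · have hbal2 := pvBal_other hp hc hbal
        have hA : stepA level (pvStackRep frames f0, subs) t = (t :: pvStackRep frames f0, subs) := by
          simp [stepA, hc]
        rw [hA]
        cases frames with
        | nil =>
          have hB : stepB level ([] ++ [f0], subs) t = ([] ++ [f0 ++ [t]], subs) := by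
            simp [stepB, hp, hc]
          rw [hB]
          have hst : t :: pvStackRep [] f0 = pvStackRep [] (f0 ++ [t]) := by simp [pvStackRep]
          rw [hst]
          exact ih [] (f0 ++ [t]) subs hbal2 (by intro f hf; simp at hf)
        | cons f1 fs =>
          have hB : stepB level ((f1 :: fs) ++ [f0], subs) t = ((f1 ++ [t]) :: fs ++ [f0], subs) := by
            simp [stepB, hp, hc]
          rw [hB]
          have hst : t :: pvStackRep (f1 :: fs) f0 = pvStackRep ((f1 ++ [t]) :: fs) f0 := by
            simp [pvStackRep]
          rw [hst]
          refine ih ((f1 ++ [t]) :: fs) f0 subs (by simpa using hbal2) ?_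
          intro f hf x hx
          rcases List.mem_cons.1 hf with h | h
          · subst h
            rcases List.mem_append.1 hx with h' | h'
            · exact hok f1 (by simp) x h'
            · simp at h'; subst h'; exact hp
          · exact hok f (by simp [h]) x hx

-- ===== VERDICT (by name: the statement is the Claim_ definition above) =====
theorem parse_const_tree_spec : Claim_equal_parse_const_tree := by
  intro tree_str level _ hpre
  unfold Spec_parse_const_tree parse_const_tree parse_const_tree_alt
  have hbal : pvBal (pvTokenize tree_str) 0 := by
    intro n
    by_cases hn : n ≤ (pvTokenize tree_str).length
    · have := hpre n hn
      omega
    · rw [List.take_of_length_le (by omega)]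
      have := hpre (pvTokenize tree_str).length le_rfl
      rw [List.take_length] at this
      omega
  have := pvMain level (pvTokenize tree_str) [] [] [] hbal (by intro f hf; simp at hf)
  simp only [pvStackRep, List.reverse_nil, List.nil_append] at this
  rw [this]
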